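-- pv_equiv track=rewrite | github.com/pranavthaivalappil/ai-prep-mentor | prepinsta50/strings/02_reverse_string.py | reverse_string_consonants_only
-- ===== SOURCE A (Python) =====
-- def reverse_string_consonants_only(s):
--     """
--     Reverse only the consonants in the string
--
--     Args:
--         s (str): Input string
--
--     Returns:
--         str: String with only consonants reversed
--     """
--     vowels = set('aeiouAEIOU')
--     char_list = list(s)
--
--     # Find all consonant positions
--     consonant_chars = []
--     consonant_positions = []
--
--     for i, char in enumerate(char_list):
--         if char.isalpha() and char not in vowels:
--             consonant_chars.append(char)
--             consonant_positions.append(i)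
--
--     # Reverse consonants and place them back
--     consonant_chars.reverse()
--
--     for i, pos in enumerate(consonant_positions):
--         char_list[pos] = consonant_chars[i]
--
--     return ''.join(char_list)
-- ===== SOURCE B (Python) =====
-- def reverse_string_consonants_only(s):
--     """Reverse only the consonants in the string, in place with two
--     converging pointers (classic two-pointer swap, O(1) extra space)."""
--     vowels = set('aeiouAEIOU')
--     chars = list(s)
--     left, right = 0, len(chars) - 1
--     while left < right:
--         if not (chars[left].isalpha() and chars[left] not in vowels):
--             left += 1
--         elif not (chars[right].isalpha() and chars[right] not in vowels):
--             right -= 1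
--         else:
--             chars[left], chars[right] = chars[right], chars[left]
--             left += 1
--             right -= 1
--     return ''.join(chars)
-- ===== Notes on version B (the rewrite author's own statement) =====
-- stated objective: alternative
-- what changed: Replaces A's three staged passes (collect consonant chars and positions, reverse the list, write it back by index) with a single two-pointer loop that converges from both ends and swaps consonant pairs in place, keeping no auxiliary lists.
import Mathlib
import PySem

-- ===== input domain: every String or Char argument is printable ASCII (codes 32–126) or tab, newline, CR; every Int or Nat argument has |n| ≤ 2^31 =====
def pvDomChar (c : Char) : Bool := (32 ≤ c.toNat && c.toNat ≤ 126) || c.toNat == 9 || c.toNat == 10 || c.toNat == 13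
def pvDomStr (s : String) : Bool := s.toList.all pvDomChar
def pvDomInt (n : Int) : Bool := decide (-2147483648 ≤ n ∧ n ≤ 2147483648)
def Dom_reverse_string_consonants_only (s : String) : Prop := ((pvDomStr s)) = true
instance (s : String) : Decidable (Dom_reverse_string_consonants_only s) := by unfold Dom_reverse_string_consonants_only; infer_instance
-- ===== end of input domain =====

-- B replaces A's collect/reverse/write-back passes with a two-pointer loop that
-- swaps consonant pairs in place from both ends (alternative algorithm, O(1) aux space).


-- ===== PORT A =====
-- vowels = set('aeiouAEIOU')  (same literal in both Pythons)
def pvVowels : PySem.Set Char := PySem.Set.ofList "aeiouAEIOU".toList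
-- char.isalpha() and char not in vowels  (the shared consonant test)
def pvIsCons (c : Char) : Bool := PySem.Chars.isalpha c && !(PySem.Set.contains pvVowels c)

def reverse_string_consonants_only (s : String) : String :=
  let charList := s.toList
  -- for i, char in enumerate(char_list): collect consonant_chars and consonant_positions
  let acc := (PySem.List.enumerate charList 0).foldl
      (fun (acc : List Char × List Int) ic =>
        if pvIsCons ic.2 then (acc.1 ++ [ic.2], acc.2 ++ [ic.1]) else acc)
      ([], [])
  -- consonant_chars.reverse()
  let consonantChars := acc.1.reverse
  -- for i, pos in enumerate(consonant_positions): char_list[pos] = consonant_chars[i]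
  let charList2 := (PySem.List.enumerate acc.2 0).foldl
      (fun l ip => PySem.List.pySetD l ip.2 (PySem.List.pyGetD consonantChars ip.1 ' ')) charList
  String.ofList charList2  -- ''.join(char_list)

-- ===== PORT B =====
-- the while-loop: two Nat indices converging; both indices stay in range while
-- left < right, so getD/set are exact (for s = "", Python has right = -1 and the
-- loop does not run; here right = 0 and it does not run either)
def pvGo (chars : List Char) (left right : Nat) : List Char :=
  if h : left < right then
    if ¬ pvIsCons (chars.getD left ' ') then pvGo chars (left + 1) right
    else if ¬ pvIsCons (chars.getD right ' ') then pvGo chars left (right - 1)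
    else
      -- chars[left], chars[right] = chars[right], chars[left]
      pvGo ((chars.set left (chars.getD right ' ')).set right (chars.getD left ' '))
        (left + 1) (right - 1)
  else chars
termination_by right - left
decreasing_by all_goals omega

def reverse_string_consonants_only_alt (s : String) : String :=
  String.ofList (pvGo s.toList 0 (s.toList.length - 1))  -- ''.join(chars)

-- ===== PRECONDITION & SPEC =====
def Spec_reverse_string_consonants_only (s : String) (out : String) : Prop := out = reverse_string_consonants_only_alt s
instance (s : String) (out : String) : Decidable (Spec_reverse_string_consonants_only s out) := by unfold Spec_reverse_string_consonants_only; infer_instance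

-- ===== CLAIM (what is proved, stated in full; the proofs are below) =====
def Claim_equal_reverse_string_consonants_only : Prop := ∀ (s : String), Dom_reverse_string_consonants_only s → Spec_reverse_string_consonants_only s (reverse_string_consonants_only s)

-- ===== LEMMAS AND PROOFS =====

-- the common specification both ports are reduced to: substitute the reversed
-- consonant list for the consonants, left to right
def pvSubst : List Char → List Char → List Char
  | [], _ => []
  | c :: cs, ys =>
    if pvIsCons c then
      match ys with
      | r :: rs => r :: pvSubst cs rs
      | [] => c :: pvSubst cs []
    else c :: pvSubst cs ys

-- ---- A-side: reduce port A to pvSubst ----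

-- positions (as Python ints) of the consonants of xs, counting from k
def pvPosns (k : Int) : List Char → List Int
  | [] => []
  | c :: cs => if pvIsCons c then k :: pvPosns (k + 1) cs else pvPosns (k + 1) cs

theorem pvPosns_length (xs : List Char) : ∀ k, (pvPosns k xs).length = (xs.filter pvIsCons).length := by
  induction xs with
  | nil => intro k; rfl
  | cons c cs ih =>
    intro k
    simp only [pvPosns, List.filter_cons]
    by_cases h : pvIsCons c = true <;> simp [h, ih]

theorem pvLoop1 (xs : List Char) : ∀ (k : Int) (accC : List Char) (accP : List Int),
    (PySem.List.enumerate xs k).foldl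
      (fun (acc : List Char × List Int) ic =>
        if pvIsCons ic.2 then (acc.1 ++ [ic.2], acc.2 ++ [ic.1]) else acc)
      (accC, accP)
    = (accC ++ xs.filter pvIsCons, accP ++ pvPosns k xs) := by
  induction xs with
  | nil => intro k accC accP; simp [PySem.List.enumerate_nil, pvPosns]
  | cons c cs ih =>
    intro k accC accP
    rw [PySem.List.enumerate_cons]
    simp only [List.foldl_cons, pvPosns, List.filter_cons]
    by_cases h : pvIsCons c = true
    · simp [h, ih]
    · simp [h, ih]

theorem pvLoop2 (ps : List Int) : ∀ (k : Nat) (ys : List Char) (l0 : List Char),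
    k + ps.length ≤ ys.length →
    (PySem.List.enumerate ps (k : Int)).foldl
      (fun l ip => PySem.List.pySetD l ip.2 (PySem.List.pyGetD ys ip.1 ' ')) l0
    = (ps.zip (ys.drop k)).foldl (fun l p => PySem.List.pySetD l p.1 p.2) l0 := by
  induction ps with
  | nil => intro k ys l0 _; simp [PySem.List.enumerate_nil]
  | cons p ps ih =>
    intro k ys l0 hk
    have hklt : k < ys.length := by simp at hk; omega
    rw [PySem.List.enumerate_cons, List.drop_eq_getElem_cons hklt]
    simp only [List.zip_cons_cons, List.foldl_cons]
    have hget : PySem.List.pyGetD ys (k : Int) ' ' = ys[k] := by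
      rw [PySem.List.pyGetD_natCast]
      simp [List.getD_eq_getElem?_getD, List.getElem?_eq_getElem hklt]
    rw [hget]
    have : ((k : Int) + 1) = ((k + 1 : Nat) : Int) := by push_cast; ring
    rw [this, ih (k + 1) ys _ (by simp at hk ⊢; omega)]

theorem pvSetZip (xs : List Char) : ∀ (pre ys : List Char),
    ys.length = (xs.filter pvIsCons).length →
    ((pvPosns (pre.length : Int) xs).zip ys).foldl
      (fun l p => PySem.List.pySetD l p.1 p.2) (pre ++ xs)
    = pre ++ pvSubst xs ys := by
  induction xs with
  | nil => intro pre ys _; simp [pvPosns, pvSubst]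
  | cons c cs ih =>
    intro pre ys hlen
    by_cases h : pvIsCons c = true
    · simp only [List.filter_cons, h, if_pos, List.length_cons] at hlen
      obtain ⟨r, rs, rfl⟩ : ∃ r rs, ys = r :: rs := by
        cases ys with
        | nil => simp at hlen
        | cons r rs => exact ⟨r, rs, rfl⟩
      simp only [pvPosns, h, if_pos, pvSubst, List.zip_cons_cons, List.foldl_cons]
      have hset : PySem.List.pySetD (pre ++ c :: cs) (pre.length : Int) r
          = (pre ++ [r]) ++ cs := by
        rw [PySem.List.pySetD_natCast]
        rw [List.set_append_right _ _ (le_refl pre.length)]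
        simp
      rw [hset]
      have hlen' : ((pre.length : Int) + 1) = (((pre ++ [r]).length : Nat) : Int) := by
        simp
      rw [hlen', ih (pre ++ [r]) rs (by simpa using hlen)]
      simp
    · simp only [List.filter_cons, h, Bool.false_eq_true, if_neg, not_false_iff] at hlen
      simp only [pvPosns, h, Bool.false_eq_true, if_neg, not_false_iff, pvSubst]
      have hlen' : ((pre.length : Int) + 1) = (((pre ++ [c]).length : Nat) : Int) := by
        simp
      have hx : pre ++ c :: cs = (pre ++ [c]) ++ cs := by simp
      rw [hx, hlen', ih (pre ++ [c]) ys (by simpa using hlen)]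
      simp

theorem portA_eq_subst (xs : List Char) :
    reverse_string_consonants_only (String.ofList xs)
    = String.ofList (pvSubst xs ((xs.filter pvIsCons).reverse)) := by
  unfold reverse_string_consonants_only
  simp only [String.toList_ofList]
  rw [pvLoop1 xs 0 [] []]
  simp only [List.nil_append]
  have h2 := pvLoop2 (pvPosns 0 xs) 0 ((xs.filter pvIsCons).reverse) xs
      (by simp [pvPosns_length])
  simp only [Nat.cast_zero, List.drop_zero] at h2
  rw [h2]
  have h3 := pvSetZip xs [] ((xs.filter pvIsCons).reverse) (by simp)
  simp only [List.length_nil, Nat.cast_zero, List.nil_append] at h3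
  rw [h3]

-- ---- B-side: reduce port B to pvSubst ----

theorem pvSubst_append (xs : List Char) : ∀ (zs ys1 ys2 : List Char),
    ys1.length = (xs.filter pvIsCons).length →
    pvSubst (xs ++ zs) (ys1 ++ ys2) = pvSubst xs ys1 ++ pvSubst zs ys2 := by
  induction xs with
  | nil =>
    intro zs ys1 ys2 h
    have : ys1 = [] := by simpa using List.length_eq_zero_iff.mp (by simpa using h)
    simp [this, pvSubst]
  | cons c cs ih =>
    intro zs ys1 ys2 h
    by_cases hc : pvIsCons c = true
    · simp only [List.filter_cons, hc, if_pos, List.length_cons] at h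
      obtain ⟨r, rs, rfl⟩ : ∃ r rs, ys1 = r :: rs := by
        cases ys1 with
        | nil => simp at h
        | cons r rs => exact ⟨r, rs, rfl⟩
      simp only [List.cons_append, pvSubst, hc, if_pos]
      rw [ih zs rs ys2 (by simpa using h)]
    · simp only [List.filter_cons, hc, Bool.false_eq_true, if_neg, not_false_iff] at h
      simp only [List.cons_append, pvSubst, hc, Bool.false_eq_true, if_neg, not_false_iff]
      rw [ih zs ys1 ys2 h]

theorem pvGetD_mid (pre t : List Char) (x d : Char) :
    (pre ++ x :: t).getD pre.length d = x := by
  simp [List.getD_eq_getElem?_getD]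

theorem pvSet_mid (pre t : List Char) (x y : Char) :
    (pre ++ x :: t).set pre.length y = pre ++ y :: t := by
  rw [List.set_append_right _ _ (le_refl pre.length)]
  simp

theorem pvGo_eq (n : Nat) : ∀ (seg : List Char), seg.length ≤ n → ∀ (pre suf : List Char),
    pvGo (pre ++ seg ++ suf) pre.length (pre.length + seg.length - 1)
    = pre ++ pvSubst seg ((seg.filter pvIsCons).reverse) ++ suf := by
  induction n with
  | zero =>
    intro seg hseg pre suf
    have : seg = [] := List.length_eq_zero_iff.mp (by omega)
    subst this
    rw [pvGo]
    simp [pvSubst]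
  | succ n ih =>
    intro seg hseg pre suf
    match seg with
    | [] =>
      rw [pvGo]; simp [pvSubst]
    | [c] =>
      rw [pvGo]
      simp only [List.length_cons, List.length_nil]
      rw [dif_neg (by omega)]
      have : pvSubst [c] (([c].filter pvIsCons).reverse) = [c] := by
        by_cases h : pvIsCons c = true <;> simp [pvSubst, h, List.filter]
      rw [this]
    | c :: b :: cs =>
      have hne : (b :: cs) ≠ ([] : List Char) := by simp
      set d := (b :: cs).getLast hne with hd
      set mid := (b :: cs).dropLast with hmid
      have hdecomp : b :: cs = mid ++ [d] := (List.dropLast_append_getLast hne).symm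
      have hmidlen : mid.length = cs.length := by simp [hmid]
      have hseglen : (c :: b :: cs).length = mid.length + 2 := by simp [hmidlen]
      have hL : pre.length < pre.length + (c :: b :: cs).length - 1 := by
        simp only [hseglen]; omega
      rw [pvGo, dif_pos hL]
      have hgetL : (pre ++ (c :: b :: cs) ++ suf).getD pre.length ' ' = c := by
        have : pre ++ (c :: b :: cs) ++ suf = pre ++ c :: (b :: cs ++ suf) := by simp
        rw [this, pvGetD_mid]
      have hassoc : pre ++ (c :: b :: cs) ++ suf
          = (pre ++ c :: mid) ++ d :: suf := by
        rw [show (c :: b :: cs) = c :: (mid ++ [d]) from by rw [← hdecomp]]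
        simp
      have hridx : pre.length + (c :: b :: cs).length - 1 = (pre ++ c :: mid).length := by
        simp [hseglen, hmidlen]
      have hgetR : (pre ++ (c :: b :: cs) ++ suf).getD
          (pre.length + (c :: b :: cs).length - 1) ' ' = d := by
        rw [hassoc, hridx, pvGetD_mid]
      rw [hgetL, hgetR]
      by_cases hc : pvIsCons c = true
      · by_cases hdc : pvIsCons d = true
        · -- both ends consonants: swap, recurse on mid
          rw [if_neg (by simp [hc]), if_neg (by simp [hdc])]
          have hset : ((pre ++ (c :: b :: cs) ++ suf).set pre.length d).set
                (pre.length + (c :: b :: cs).length - 1) c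
              = (pre ++ [d]) ++ mid ++ (c :: suf) := by
            have h1 : (pre ++ (c :: b :: cs) ++ suf).set pre.length d
                = (pre ++ d :: mid) ++ d :: suf := by
              have hx : pre ++ (c :: b :: cs) ++ suf = pre ++ c :: (mid ++ [d] ++ suf) := by
                rw [hdecomp]; simp
              rw [hx, pvSet_mid]; simp
            have h3 : (pre ++ d :: mid).length = pre.length + (c :: b :: cs).length - 1 := by
              simp [hseglen, hmidlen]
            rw [h1, ← h3, pvSet_mid]
            simp
          rw [hset]
          have hrec := ih mid (by omega) (pre ++ [d]) (c :: suf)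
          have hidx1 : pre.length + 1 = (pre ++ [d]).length := by simp
          have hidx2 : pre.length + (c :: b :: cs).length - 1 - 1
              = (pre ++ [d]).length + mid.length - 1 := by
            simp only [hseglen, List.length_append, List.length_cons, List.length_nil]
            omega
          rw [hidx1, hidx2, hrec]
          -- now compute the RHS pvSubst on c :: mid ++ [d]
          have hfil : ((c :: b :: cs).filter pvIsCons).reverse
              = d :: ((mid.filter pvIsCons).reverse ++ [c]) := by
            rw [hdecomp]
            simp [List.filter_append, hc, hdc]
          rw [hfil]
          have hsub : pvSubst (c :: b :: cs) (d :: ((mid.filter pvIsCons).reverse ++ [c]))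
              = d :: (pvSubst mid ((mid.filter pvIsCons).reverse) ++ [c]) := by
            rw [hdecomp]
            simp only [pvSubst, hc, if_pos]
            rw [pvSubst_append mid [d] ((mid.filter pvIsCons).reverse) [c] (by simp)]
            simp [pvSubst, hdc]
          rw [hsub]
          simp
        · -- last char not a consonant: move right inward
          rw [if_neg (by simp [hc]), if_pos (by simp [hdc])]
          have hrec := ih (c :: mid) (by simp [hmidlen]; omega) pre (d :: suf)
          have hidx : pre.length + (c :: b :: cs).length - 1 - 1
              = pre.length + (c :: mid).length - 1 := by
            simp [hseglen]
          rw [hassoc, show (pre ++ c :: mid) ++ d :: suf = pre ++ (c :: mid) ++ (d :: suf) from by simp,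
            hidx, hrec]
          have hfil : (c :: b :: cs).filter pvIsCons = (c :: mid).filter pvIsCons := by
            rw [hdecomp]
            simp [List.filter_append, hc, hdc]
          rw [hfil]
          have hsub : pvSubst (c :: b :: cs) (((c :: mid).filter pvIsCons).reverse)
              = pvSubst (c :: mid) (((c :: mid).filter pvIsCons).reverse) ++ [d] := by
            rw [hdecomp, show c :: (mid ++ [d]) = (c :: mid) ++ [d] from by simp]
            rw [show (((c :: mid).filter pvIsCons).reverse)
                = (((c :: mid).filter pvIsCons).reverse) ++ [] from by simp]
            rw [pvSubst_append (c :: mid) [d] _ [] (by simp)]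
            simp [pvSubst, hdc]
          rw [hsub]
          simp
      · -- first char not a consonant: move left inward
        rw [if_pos (by simp [hc])]
        have hrec := ih (b :: cs) (by simpa using hseg) (pre ++ [c]) suf
        have hidx1 : pre.length + 1 = (pre ++ [c]).length := by simp
        have hidx2 : pre.length + (c :: b :: cs).length - 1
            = (pre ++ [c]).length + (b :: cs).length - 1 := by
          simp
          omega
        rw [show pre ++ (c :: b :: cs) ++ suf = (pre ++ [c]) ++ (b :: cs) ++ suf from by simp,
          hidx1, hidx2, hrec]
        have hfil : (c :: b :: cs).filter pvIsCons = (b :: cs).filter pvIsCons := by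
          simp [List.filter_cons, hc]
        rw [hfil]
        have hsub : pvSubst (c :: b :: cs) (((b :: cs).filter pvIsCons).reverse)
            = c :: pvSubst (b :: cs) (((b :: cs).filter pvIsCons).reverse) := by
          simp [pvSubst, hc]
        rw [hsub]
        simp

theorem portB_eq_subst (xs : List Char) :
    reverse_string_consonants_only_alt (String.ofList xs)
    = String.ofList (pvSubst xs ((xs.filter pvIsCons).reverse)) := by
  unfold reverse_string_consonants_only_alt
  simp only [String.toList_ofList]
  have h := pvGo_eq xs.length xs (le_refl _) [] []
  simp only [List.length_nil, List.nil_append, List.append_nil, Nat.zero_add] at h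
  rw [h]

-- ===== VERDICT (by name: the statement is the Claim_ definition above) =====
theorem reverse_string_consonants_only_spec : Claim_equal_reverse_string_consonants_only := by
  intro s _
  unfold Spec_reverse_string_consonants_only
  have hs : s = String.ofList s.toList := by simp
  rw [hs, portA_eq_subst, portB_eq_subst]
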